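-- pv_equiv track=rewrite | github.com/iLynx26/python-st-ignatus-04-string-manipulation-iLynx26 | tests/test_exercise_12.py | draw_penguins
-- ===== SOURCE A (Python) =====
-- def draw_penguins(n):
--     output = ""
--     for i in range(1, n + 1):
--         output += "   _~_        "
--     output += "\n"
--
--     for i in range(1, n + 1):
--         output += "  (o o)       "
--     output += "\n"
--
--     for i in range(1, n + 1):
--         output += " /  V  \\      "
--     output += "\n"
--
--     for i in range(1, n + 1):
--         output += f"/(  {i}  )\\     "
--     output += "\n"
--
--     for i in range(1, n + 1):
--         output += "  ^^ ^^       "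
--     output += "\n"
--
--     return output
-- ===== SOURCE B (Python) =====
-- def draw_penguins(n):
--     r0 = r1 = r2 = r3 = r4 = ""
--     for i in range(1, n + 1):
--         r0 += "   _~_        "
--         r1 += "  (o o)       "
--         r2 += " /  V  \\      "
--         r3 += f"/(  {i}  )\\     "
--         r4 += "  ^^ ^^       "
--     return r0 + "\n" + r1 + "\n" + r2 + "\n" + r3 + "\n" + r4 + "\n"
-- ===== Notes on version B (the rewrite author's own statement) =====
-- stated objective: alternative
-- what changed: Replaces A's five separate column-major loops (one per art line) by a single row-major pass that appends each fixed segment to all five row accumulators at once, then concatenates the rows with newlines.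
import Mathlib
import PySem

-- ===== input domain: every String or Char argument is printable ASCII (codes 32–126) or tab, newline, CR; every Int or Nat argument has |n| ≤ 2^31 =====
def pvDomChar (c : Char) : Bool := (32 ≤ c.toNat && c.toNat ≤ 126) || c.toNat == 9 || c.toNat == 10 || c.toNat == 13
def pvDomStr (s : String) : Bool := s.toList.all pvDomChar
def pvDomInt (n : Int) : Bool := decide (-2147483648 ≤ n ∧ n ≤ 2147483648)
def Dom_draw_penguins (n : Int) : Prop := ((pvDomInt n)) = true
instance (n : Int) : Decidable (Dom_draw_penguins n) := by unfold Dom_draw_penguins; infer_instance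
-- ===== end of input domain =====

-- B fuses A's five column-major loops into one row-major pass over five row accumulators; alternative decomposition, same cost.

-- ===== PORT A =====
-- A: five separate loops, each appending its segment (row 4 uses str(i)) to one growing output string.
def draw_penguins (n : Int) : String :=
  let out : List Char := (PySem.List.pyRange 1 (n + 1) 1).foldl
    (fun acc _ => acc ++ "   _~_        ".toList) []
  let out := out ++ ['\n']
  let out := (PySem.List.pyRange 1 (n + 1) 1).foldl
    (fun acc _ => acc ++ "  (o o)       ".toList) out
  let out := out ++ ['\n']
  let out := (PySem.List.pyRange 1 (n + 1) 1).foldl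
    (fun acc _ => acc ++ " /  V  \\      ".toList) out
  let out := out ++ ['\n']
  let out := (PySem.List.pyRange 1 (n + 1) 1).foldl
    (fun acc i => acc ++ ("/(  ".toList ++ PySem.Int.toChars i ++ "  )\\     ".toList)) out
  let out := out ++ ['\n']
  let out := (PySem.List.pyRange 1 (n + 1) 1).foldl
    (fun acc _ => acc ++ "  ^^ ^^       ".toList) out
  let out := out ++ ['\n']
  String.mk out

-- ===== PORT B =====
-- B: one pass appending each segment to its own row accumulator; then concatenate the rows with '\n'.
def draw_penguins_alt (n : Int) : String :=
  let rows : List Char × List Char × List Char × List Char × List Char :=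
    (PySem.List.pyRange 1 (n + 1) 1).foldl
      (fun r i =>
        (r.1 ++ "   _~_        ".toList,
         r.2.1 ++ "  (o o)       ".toList,
         r.2.2.1 ++ " /  V  \\      ".toList,
         r.2.2.2.1 ++ ("/(  ".toList ++ PySem.Int.toChars i ++ "  )\\     ".toList),
         r.2.2.2.2 ++ "  ^^ ^^       ".toList))
      ([], [], [], [], [])
  String.mk (rows.1 ++ ['\n'] ++ rows.2.1 ++ ['\n'] ++ rows.2.2.1 ++ ['\n'] ++
             rows.2.2.2.1 ++ ['\n'] ++ rows.2.2.2.2 ++ ['\n'])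

-- ===== PRECONDITION & SPEC =====
def Spec_draw_penguins (n : Int) (out : String) : Prop := out = draw_penguins_alt n
instance (n : Int) (out : String) : Decidable (Spec_draw_penguins n out) := by unfold Spec_draw_penguins; infer_instance

-- ===== CLAIM (what is proved, stated in full; the proofs are below) =====
def Claim_equal_draw_penguins : Prop := ∀ (n : Int), Dom_draw_penguins n → Spec_draw_penguins n (draw_penguins n)

-- ===== LEMMAS AND PROOFS =====

-- B's single fold componentwise: each row is its accumulator followed by the flatMap of its segment function.
theorem alt_fold_eq (l : List Int) (r1 r2 r3 r4 r5 : List Char) :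
    l.foldl
      (fun (r : List Char × List Char × List Char × List Char × List Char) i =>
        (r.1 ++ "   _~_        ".toList,
         r.2.1 ++ "  (o o)       ".toList,
         r.2.2.1 ++ " /  V  \\      ".toList,
         r.2.2.2.1 ++ ("/(  ".toList ++ PySem.Int.toChars i ++ "  )\\     ".toList),
         r.2.2.2.2 ++ "  ^^ ^^       ".toList))
      (r1, r2, r3, r4, r5)
    = (r1 ++ l.flatMap (fun _ => "   _~_        ".toList),
       r2 ++ l.flatMap (fun _ => "  (o o)       ".toList),
       r3 ++ l.flatMap (fun _ => " /  V  \\      ".toList),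
       r4 ++ l.flatMap (fun i => "/(  ".toList ++ PySem.Int.toChars i ++ "  )\\     ".toList),
       r5 ++ l.flatMap (fun _ => "  ^^ ^^       ".toList)) := by
  induction l generalizing r1 r2 r3 r4 r5 with
  | nil => simp
  | cons x xs ih => rw [List.foldl_cons, ih]
                    simp [List.append_assoc]

-- ===== VERDICT (by name: the statement is the Claim_ definition above) =====
theorem draw_penguins_spec : Claim_equal_draw_penguins := by
  intro n _
  show _ = _
  unfold draw_penguins draw_penguins_alt
  rw [alt_fold_eq]
  simp only [PySem.List.foldl_append_eq_flatMap, List.nil_append, List.append_assoc]
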